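-- pv_equiv track=rewrite | github.com/cnp777/CS303E-Elements-of-Comptrs-Programmng-Wb | Exam2B.py | quicksortPivot
-- ===== SOURCE A (Python) =====
-- def quicksortPivot(lst, idx):
--
--     less = []
--     pivot = []
--     greater = []
--
--     for nb in lst:
--         if nb < lst[idx]:
--             less.append(nb)
--         elif nb > lst[idx]:
--             greater.append(nb)
--         else:
--             pivot.append(nb)
--
--     return less + pivot + greater
-- ===== SOURCE B (Python) =====
-- def quicksortPivot(lst, idx):
--     # Stable sort by the sign of comparison with the pivot: elements < pivot get key -1,
--     # equal get 0, greater get 1; stability keeps each group in original order, which is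
--     # exactly less + pivot + greater.
--     return sorted(lst, key=lambda x: (x > lst[idx]) - (x < lst[idx]))
-- ===== Notes on version B (the rewrite author's own statement) =====
-- stated objective: alternative
-- what changed: Replaces the explicit three-way partition loop by a single stable sort keyed on the comparison sign (x > pivot) - (x < pivot); stability of sorted makes the result exactly less + pivot + greater.
import Mathlib
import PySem

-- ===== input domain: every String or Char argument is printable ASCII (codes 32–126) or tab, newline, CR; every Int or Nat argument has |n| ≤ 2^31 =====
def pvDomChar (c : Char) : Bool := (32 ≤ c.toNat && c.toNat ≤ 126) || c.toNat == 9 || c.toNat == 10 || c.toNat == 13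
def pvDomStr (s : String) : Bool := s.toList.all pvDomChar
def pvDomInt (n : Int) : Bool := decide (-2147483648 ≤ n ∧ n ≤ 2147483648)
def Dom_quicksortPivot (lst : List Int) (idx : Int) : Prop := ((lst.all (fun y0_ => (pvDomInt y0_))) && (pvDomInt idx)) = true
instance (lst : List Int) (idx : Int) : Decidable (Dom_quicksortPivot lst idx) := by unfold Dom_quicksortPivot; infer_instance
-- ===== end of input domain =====

-- B replaces A's three-way partition loop with one stable sort keyed on the comparison sign with the pivot (alternative algorithm, same result).


-- ===== PORT A =====
-- single pass, three accumulators; lst[idx] read via pyGetD (exact under Pre_: index in range whenever the loop runs)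
def quicksortPivot (lst : List Int) (idx : Int) : List Int :=
  let s := lst.foldl
    (fun (acc : List Int × List Int × List Int) nb =>
      if nb < PySem.List.pyGetD lst idx 0 then (acc.1 ++ [nb], acc.2.1, acc.2.2)
      else if PySem.List.pyGetD lst idx 0 < nb then (acc.1, acc.2.1, acc.2.2 ++ [nb])
      else (acc.1, acc.2.1 ++ [nb], acc.2.2))
    ([], [], [])
  s.1 ++ s.2.1 ++ s.2.2

-- ===== PORT B =====
-- one stable sort keyed on the comparison sign with the pivot: (x > lst[idx]) - (x < lst[idx])
def quicksortPivot_alt (lst : List Int) (idx : Int) : List Int :=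
  PySem.List.sorted lst
    (fun x => (if PySem.List.pyGetD lst idx 0 < x then (1 : Int) else 0)
            - (if x < PySem.List.pyGetD lst idx 0 then (1 : Int) else 0)) false

-- ===== PRECONDITION & SPEC =====
-- Pre_ excludes exactly the inputs where Python raises IndexError (in both A and B): nonempty lst with idx out of range.
def Pre_quicksortPivot (lst : List Int) (idx : Int) : Prop :=
  lst = [] ∨ PySem.Raise.InRange lst.length idx
instance (lst : List Int) (idx : Int) : Decidable (Pre_quicksortPivot lst idx) := by
  unfold Pre_quicksortPivot; infer_instance
def pvWitness_quicksortPivot : List Int × Int := ([3, 1, 2, 1], 0)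

def Spec_quicksortPivot (lst : List Int) (idx : Int) (out : List Int) : Prop := out = quicksortPivot_alt lst idx
instance (lst : List Int) (idx : Int) (out : List Int) : Decidable (Spec_quicksortPivot lst idx out) := by unfold Spec_quicksortPivot; infer_instance

-- ===== CLAIM (what is proved, stated in full; the proofs are below) =====
def Claim_equal_quicksortPivot : Prop := ∀ (lst : List Int) (idx : Int), Dom_quicksortPivot lst idx → Pre_quicksortPivot lst idx → Spec_quicksortPivot lst idx (quicksortPivot lst idx)

-- ===== LEMMAS AND PROOFS =====
-- A's loop computes the three filters.
lemma part_loop (p : Int) (l a b c : List Int) :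
    l.foldl
      (fun (acc : List Int × List Int × List Int) nb =>
        if nb < p then (acc.1 ++ [nb], acc.2.1, acc.2.2)
        else if p < nb then (acc.1, acc.2.1, acc.2.2 ++ [nb])
        else (acc.1, acc.2.1 ++ [nb], acc.2.2))
      (a, b, c)
    = (a ++ l.filter (fun x => decide (x < p)),
       b ++ l.filter (fun x => x == p),
       c ++ l.filter (fun x => decide (p < x))) := by
  induction l generalizing a b c with
  | nil => simp
  | cons x l ih =>
    rcases lt_trichotomy x p with h | h | h
    · simp [List.foldl_cons, ih, h, not_lt_of_gt h, ne_of_lt h]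
    · subst h; simp [List.foldl_cons, ih]
    · simp [List.foldl_cons, ih, h, not_lt_of_gt h, (ne_of_gt h)]

-- insertBy places x right after the block where 'before' is false.
lemma insertBy_split {α : Type} (before : α → α → Bool) (x : α) (a b : List α)
    (ha : ∀ y ∈ a, before x y = false) (hb : ∀ y ∈ b, before x y = true) :
    PySem.List.insertBy before x (a ++ b) = a ++ x :: b := by
  induction a with
  | nil =>
    cases b with
    | nil => simp [PySem.List.insertBy]
    | cons y t => simp [PySem.List.insertBy, hb y (by simp)]
  | cons z a ih =>
    simp [PySem.List.insertBy, ha z (by simp),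
      ih (fun y hy => ha y (by simp [hy]))]

-- B's stable sort with the sign key is the three filters concatenated.
lemma sort_part (p : Int) (l : List Int) :
    PySem.List.sorted l
      (fun x => (if p < x then (1 : Int) else 0) - (if x < p then (1 : Int) else 0)) false
    = l.filter (fun x => decide (x < p)) ++ l.filter (fun x => x == p)
        ++ l.filter (fun x => decide (p < x)) := by
  rw [PySem.List.sorted_eq_foldl_insertBy]
  induction l using List.reverseRecOn with
  | nil => simp
  | append_singleton l x ih =>
    rw [List.foldl_append, ih]
    simp only [List.foldl_cons, List.foldl_nil, List.filter_append]
    rcases lt_trichotomy x p with h | h | h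
    · rw [List.append_assoc, insertBy_split _ x _ _
        (by intro y hy
            simp only [List.mem_filter, decide_eq_true_eq] at hy
            norm_num [h, hy.2, not_lt_of_gt h, not_lt_of_gt hy.2])
        (by intro y hy
            simp only [List.mem_append, List.mem_filter] at hy
            rcases hy with ⟨_, hy⟩ | ⟨_, hy⟩
            · have hyp : y = p := by simpa using hy
              subst hyp
              norm_num [h, not_lt_of_gt h]
            · have hpy : p < y := by simpa using hy
              norm_num [h, hpy, not_lt_of_gt h, not_lt_of_gt hpy])]
      simp [h, not_lt_of_gt h, ne_of_lt h]
    · subst h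
      rw [insertBy_split _ x _ _
        (by intro y hy
            simp only [List.mem_append, List.mem_filter] at hy
            rcases hy with ⟨_, hy⟩ | ⟨_, hy⟩
            · have hyx : y < x := by simpa using hy
              norm_num [hyx, not_lt_of_gt hyx]
            · have hyx : y = x := by simpa using hy
              subst hyx
              norm_num)
        (by intro y hy
            simp only [List.mem_filter, decide_eq_true_eq] at hy
            norm_num [hy.2, not_lt_of_gt hy.2])]
      simp [List.append_assoc]
    · rw [PySem.List.insertBy_of_forall_not_before _ x _
        (by intro y hy
            simp only [List.mem_append, List.mem_filter] at hy
            rcases hy with (⟨_, hy⟩ | ⟨_, hy⟩) | ⟨_, hy⟩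
            · have hyp : y < p := by simpa using hy
              norm_num [h, hyp, not_lt_of_gt h, not_lt_of_gt hyp, not_lt_of_gt (lt_trans hyp h)]
            · have hyp : y = p := by simpa using hy
              subst hyp
              norm_num [h, lt_irrefl, not_lt_of_gt h]
            · have hpy : p < y := by simpa using hy
              norm_num [h, hpy, not_lt_of_gt h, not_lt_of_gt hpy])]
      simp [h, not_lt_of_gt h, ne_of_gt h, List.append_assoc]

-- ===== VERDICT (by name: the statement is the Claim_ definition above) =====
theorem quicksortPivot_spec : Claim_equal_quicksortPivot := by
  intro lst idx _ _
  unfold Spec_quicksortPivot quicksortPivot quicksortPivot_alt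
  simp only [part_loop, sort_part, List.nil_append, List.append_assoc]
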